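-- pv_equiv track=rewrite | github.com/gauravdave083/Top_100_Questions | Accenture_Previous/question9.py | get_unique_stones_to_bring
-- ===== SOURCE A (Python) =====
-- def get_unique_stones_to_bring(M,N,common_stones):
--
--     mars_weight = list(range(1, M+1))
--
--     earth_weight = common_stones
--
--     mars_set = set(mars_weight)
--     earth_set = set(earth_weight)
--
--     unique_mars_weight = list(mars_set - earth_set)
--
--     unique_mars_weight.sort()
--
--     total_weight = 0
--     num_stones_selected = 0
--
--     for i in unique_mars_weight:
--         if total_weight + i <= M:
--             total_weight += i
--             num_stones_selected += 1
--         else: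
--             break
--
--     return num_stones_selected
-- ===== SOURCE B (Python) =====
-- def get_unique_stones_to_bring(M, N, common_stones):
--     # Run-based algorithm: the allowed weights between consecutive excluded
--     # weights form contiguous runs lo..hi; add whole runs with the
--     # arithmetic-series formula, and inside the run where the budget runs out
--     # binary-search the largest prefix that still fits.  O(C log C + log M)
--     # instead of walking every weight.
--     excluded = sorted({c for c in common_stones if 1 <= c <= M})
--     total = 0
--     count = 0
--     lo = 1
--     for e in excluded + [M + 1]:
--         hi = e - 1
--         if lo <= hi:
--             run_sum = (lo + hi) * (hi - lo + 1) // 2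
--             if total + run_sum <= M:
--                 total += run_sum
--                 count += hi - lo + 1
--             else:
--                 # largest t in [lo-1, hi] with total + (lo+t)(t-lo+1)//2 <= M
--                 t = lo - 1
--                 a, b = lo, hi
--                 while a <= b:
--                     mid = (a + b) // 2
--                     if total + (lo + mid) * (mid - lo + 1) // 2 <= M:
--                         t = mid
--                         a = mid + 1
--                     else:
--                         b = mid - 1
--                 return count + t - lo + 1
--         lo = e + 1
--     return count
-- ===== Notes on version B (the rewrite author's own statement) =====
-- stated objective: faster
-- what changed: Instead of materialising 1..M, set-subtracting, sorting and walking every weight, B sorts only the excluded weights, adds each gap between them as a whole run with the arithmetic-series closed form, and binary-searches the cut-off inside the run where the budget runs out.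
import Mathlib
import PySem

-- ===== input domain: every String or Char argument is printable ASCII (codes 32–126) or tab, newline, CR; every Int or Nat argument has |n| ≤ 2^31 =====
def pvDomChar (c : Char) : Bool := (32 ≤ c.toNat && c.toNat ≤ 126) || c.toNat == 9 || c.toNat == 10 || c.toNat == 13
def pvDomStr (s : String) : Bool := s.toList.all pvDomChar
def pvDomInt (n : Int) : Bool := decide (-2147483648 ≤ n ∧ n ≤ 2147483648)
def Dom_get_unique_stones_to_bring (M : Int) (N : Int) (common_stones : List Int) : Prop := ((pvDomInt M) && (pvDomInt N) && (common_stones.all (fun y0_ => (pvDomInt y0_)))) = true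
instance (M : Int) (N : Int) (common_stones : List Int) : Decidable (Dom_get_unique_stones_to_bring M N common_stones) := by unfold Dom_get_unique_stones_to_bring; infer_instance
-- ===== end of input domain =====

-- B replaces A's walk over every weight 1..M by a run-based algorithm: whole
-- gaps between excluded weights are added with the arithmetic-series formula
-- and the cut-off inside the last run is found by binary search (alternative).

-- ===== PORT A =====
-- the 'for i in unique_mars_weight: … else: break' loop of A
def pvLoopA (M : Int) : List Int → Int → Int → Int
  | [], _, cnt => cnt
  | i :: rest, tot, cnt =>
      if tot + i ≤ M then pvLoopA M rest (tot + i) (cnt + 1) else cnt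

def get_unique_stones_to_bring (M : Int) (N : Int) (common_stones : List Int) : Int :=
  let mars_weight := PySem.List.pyRange 1 (M + 1) 1
  let earth_weight := common_stones
  let mars_set := PySem.Set.ofList mars_weight
  let earth_set := PySem.Set.ofList earth_weight
  let unique_mars_weight := PySem.Set.diff mars_set earth_set
  -- list(...) then .sort(): sorting makes the set's iteration order irrelevant
  let sorted_unique := PySem.List.sorted unique_mars_weight (fun x => x) false
  pvLoopA M sorted_unique 0 0

-- ===== PORT B =====
-- the 'while a <= b' binary search of B (t = best cut found so far)
def pvBin (M lo total : Int) (a b t : Int) : Int :=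
  if h : a ≤ b then
    if total + PySem.Int.floordiv ((lo + PySem.Int.floordiv (a + b) 2) * (PySem.Int.floordiv (a + b) 2 - lo + 1)) 2 ≤ M then
      pvBin M lo total (PySem.Int.floordiv (a + b) 2 + 1) b (PySem.Int.floordiv (a + b) 2)
    else
      pvBin M lo total a (PySem.Int.floordiv (a + b) 2 - 1) t
  else t
termination_by (b - a + 1).toNat
decreasing_by
  · have := PySem.Int.floordiv_two_mid_bounds h; omega
  · have := PySem.Int.floordiv_two_mid_bounds h; omega

-- the 'for e in excluded + [M+1]' loop of B (lo, total, count as state)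
def pvRunLoop (M : Int) : List Int → Int → Int → Int → Int
  | [], _, _, count => count
  | e :: rest, lo, total, count =>
      let hi := e - 1
      if lo ≤ hi then
        let run_sum := PySem.Int.floordiv ((lo + hi) * (hi - lo + 1)) 2
        if total + run_sum ≤ M then
          pvRunLoop M rest (e + 1) (total + run_sum) (count + (hi - lo + 1))
        else
          count + pvBin M lo total lo hi (lo - 1) - lo + 1   -- early 'return'
      else pvRunLoop M rest (e + 1) total count

def get_unique_stones_to_bring_alt (M : Int) (N : Int) (common_stones : List Int) : Int :=
  let excluded := PySem.List.sorted
    (PySem.Set.ofList (common_stones.filter (fun c => decide (1 ≤ c) && decide (c ≤ M))))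
    (fun x => x) false
  pvRunLoop M (excluded ++ [M + 1]) 1 0 0

-- ===== PRECONDITION & SPEC =====
def Spec_get_unique_stones_to_bring (M : Int) (N : Int) (common_stones : List Int) (out : Int) : Prop := out = get_unique_stones_to_bring_alt M N common_stones
instance (M : Int) (N : Int) (common_stones : List Int) (out : Int) : Decidable (Spec_get_unique_stones_to_bring M N common_stones out) := by unfold Spec_get_unique_stones_to_bring; infer_instance

-- ===== CLAIM (what is proved, stated in full; the proofs are below) =====
def Claim_equal_get_unique_stones_to_bring : Prop := ∀ (M : Int) (N : Int) (common_stones : List Int), Dom_get_unique_stones_to_bring M N common_stones → Spec_get_unique_stones_to_bring M N common_stones (get_unique_stones_to_bring M N common_stones)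

-- ===== LEMMAS AND PROOFS =====

-- triSum lo t = lo + (lo+1) + … + t (0 at t = lo-1), the closed form B uses
def triSum (lo t : Int) : Int := PySem.Int.floordiv ((lo + t) * (t - lo + 1)) 2

lemma triSum_two (lo t : Int) : 2 * triSum lo t = (lo + t) * (t - lo + 1) := by
  have hdvd : (2 : Int) ∣ (lo + t) * (t - lo + 1) := by
    rcases Int.even_or_odd (lo + t) with h | h
    · obtain ⟨k, hk⟩ := h
      exact ⟨k * (t - lo + 1), by rw [show lo + t = k + k from hk]; ring⟩
    · obtain ⟨k, hk⟩ := h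
      exact ⟨(lo + t) * (t - k), by rw [show t - lo + 1 = 2 * (t - k) by omega]; ring⟩
  obtain ⟨c, hc⟩ := hdvd
  have : triSum lo t = c := by
    unfold triSum
    rw [hc, PySem.Int.floordiv_eq_ediv_of_pos (by norm_num)]
    exact Int.mul_ediv_cancel_left c (by norm_num)
  omega

lemma triSum_base (lo : Int) : triSum lo (lo - 1) = 0 := by
  have h := triSum_two lo (lo - 1)
  have : (lo + (lo - 1)) * ((lo - 1) - lo + 1) = 0 := by ring
  omega

lemma triSum_self (lo : Int) : triSum lo lo = lo := by
  have h := triSum_two lo lo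
  have : (lo + lo) * (lo - lo + 1) = 2 * lo := by ring
  omega

lemma triSum_shift (lo t : Int) : triSum lo t = lo + triSum (lo + 1) t := by
  have h1 := triSum_two lo t
  have h2 := triSum_two (lo + 1) t
  have : (lo + t) * (t - lo + 1) = (lo + 1 + t) * (t - (lo + 1) + 1) + 2 * lo := by ring
  omega

lemma triSum_mono (lo s t : Int) (hlo : 1 ≤ lo) (hs : lo - 1 ≤ s) (hst : s ≤ t) :
    triSum lo s ≤ triSum lo t := by
  have h1 := triSum_two lo s
  have h2 := triSum_two lo t
  have key : (lo + t) * (t - lo + 1) - (lo + s) * (s - lo + 1) = (t - s) * (t + s + 1) := by ring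
  have pos : 0 ≤ (t - s) * (t + s + 1) :=
    mul_nonneg (by omega) (by omega)
  linarith

-- the cut in a run lo..hi is unique: P t ∧ (t = hi ∨ ¬P (t+1)) pins t down
lemma cut_unique (M lo hi tot t1 t2 : Int) (hlo : 1 ≤ lo)
    (hb1 : lo - 1 ≤ t1) (hu1 : t1 ≤ hi) (hb2 : lo - 1 ≤ t2) (hu2 : t2 ≤ hi)
    (hP1 : tot + triSum lo t1 ≤ M) (hc1 : t1 = hi ∨ ¬ (tot + triSum lo (t1 + 1) ≤ M))
    (hP2 : tot + triSum lo t2 ≤ M) (hc2 : t2 = hi ∨ ¬ (tot + triSum lo (t2 + 1) ≤ M)) :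
    t1 = t2 := by
  rcases lt_trichotomy t1 t2 with h | h | h
  · exfalso
    rcases hc1 with h1 | h1
    · omega
    · exact h1 (le_trans (by have := triSum_mono lo (t1 + 1) t2 hlo (by omega) (by omega); omega) hP2)
  · exact h
  · exfalso
    rcases hc2 with h2 | h2
    · omega
    · exact h2 (le_trans (by have := triSum_mono lo (t2 + 1) t1 hlo (by omega) (by omega); omega) hP1)

-- the binary search returns the unique cut of the run lo..hi
lemma pvBin_char (M lo tot hi : Int) (hlo : 1 ≤ lo) :
    ∀ (n : Nat) (a b : Int), n = (b - a + 1).toNat →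
      lo ≤ a → a ≤ hi + 1 → b ≤ hi →
      (tot + triSum lo (a - 1) ≤ M) →
      (∀ x, b < x → x ≤ hi → ¬ (tot + triSum lo x ≤ M)) →
      lo - 1 ≤ pvBin M lo tot a b (a - 1) ∧ pvBin M lo tot a b (a - 1) ≤ hi ∧
      (tot + triSum lo (pvBin M lo tot a b (a - 1)) ≤ M) ∧
      (pvBin M lo tot a b (a - 1) = hi ∨ ¬ (tot + triSum lo (pvBin M lo tot a b (a - 1) + 1) ≤ M)) := by
  intro n
  induction n using Nat.strong_induction_on with
  | _ n ih =>
    intro a b hn ha hahi hbhi hPa hfail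
    by_cases hab : a ≤ b
    · have hmid := PySem.Int.floordiv_two_mid_bounds hab
      rw [pvBin, dif_pos hab]
      set mid := PySem.Int.floordiv (a + b) 2 with hmiddef
      by_cases hfit : tot + PySem.Int.floordiv ((lo + mid) * (mid - lo + 1)) 2 ≤ M
      · rw [if_pos hfit]
        have h := ih ((b - (mid + 1) + 1).toNat) (by omega) (mid + 1) b rfl (by omega) (by omega)
          hbhi (by rw [show mid + 1 - 1 = mid by omega]; exact hfit) hfail
        simp only [add_sub_cancel_right] at h
        exact h
      · rw [if_neg hfit]
        refine ih ((mid - 1 - a + 1).toNat) (by omega) a (mid - 1) rfl ha hahi (by omega) hPa ?_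
        intro x hx1 hx2
        by_cases hxb : b < x
        · exact hfail x hxb hx2
        · -- mid ≤ x ≤ b: monotonicity from the failed test at mid
          intro hPx
          have hm := triSum_mono lo mid x hlo (by omega) (by omega)
          exact hfit (show tot + triSum lo mid ≤ M by omega)
    · rw [pvBin, dif_neg hab]
      refine ⟨by omega, by omega, hPa, ?_⟩
      by_cases hhi : a - 1 = hi
      · exact Or.inl hhi
      · refine Or.inr ?_
        rw [show a - 1 + 1 = a by omega]
        exact hfail a (by omega) (by omega)

-- A's greedy walk over a full run lo..hi: takes it whole if it fits, else
-- stops at the unique cut t of the run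
lemma loopA_run (M hi : Int) (rest : List Int) :
    ∀ (n : Nat) (lo tot cnt : Int), n = (hi + 1 - lo).toNat →
      1 ≤ lo → lo ≤ hi + 1 → tot ≤ M →
      ((tot + triSum lo hi ≤ M →
          pvLoopA M (PySem.List.pyRange lo (hi + 1) 1 ++ rest) tot cnt
            = pvLoopA M rest (tot + triSum lo hi) (cnt + (hi + 1 - lo))) ∧
       (¬ (tot + triSum lo hi ≤ M) →
          ∃ t, lo - 1 ≤ t ∧ t < hi ∧ tot + triSum lo t ≤ M ∧
            ¬ (tot + triSum lo (t + 1) ≤ M) ∧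
            pvLoopA M (PySem.List.pyRange lo (hi + 1) 1 ++ rest) tot cnt = cnt + (t - lo + 1))) := by
  intro n
  induction n with
  | zero =>
    intro lo tot cnt hn hlo1 hle htot
    have h0 : triSum lo hi = 0 := by
      rw [show hi = lo - 1 by omega]; exact triSum_base lo
    constructor
    · intro _
      rw [PySem.List.pyRange_one_eq_nil (by omega), List.nil_append]
      congr 1 <;> omega
    · intro hbad
      exact absurd (by omega) hbad
  | succ n ih =>
    intro lo tot cnt hn hlo1 hle htot
    have hlohi : lo ≤ hi := by omega
    rw [PySem.List.pyRange_one_cons (by omega : lo < hi + 1), List.cons_append]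
    by_cases hfit : tot + lo ≤ M
    · have ihr := ih (lo + 1) (tot + lo) (cnt + 1) (by omega) (by omega) (by omega) hfit
      constructor
      · intro hall
        rw [pvLoopA, if_pos hfit]
        rw [(ihr.1 (by have := triSum_shift lo hi; omega))]
        rw [show tot + triSum lo hi = tot + lo + triSum (lo + 1) hi from by
              have := triSum_shift lo hi; omega]
        congr 1; omega
      · intro hnall
        obtain ⟨t, h1, h2, h3, h4, h5⟩ :=
          ihr.2 (by have := triSum_shift lo hi; omega)
        refine ⟨t, by omega, h2, ?_, ?_, ?_⟩
        · have := triSum_shift lo t; omega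
        · have := triSum_shift lo (t + 1); omega
        · rw [pvLoopA, if_pos hfit, h5]; omega
    · constructor
      · intro hall
        exfalso
        have hmono := triSum_mono lo lo hi hlo1 (by omega) hlohi
        have := triSum_self lo
        omega
      · intro _
        refine ⟨lo - 1, by omega, by omega, ?_, ?_, ?_⟩
        · rw [triSum_base]; omega
        · rw [show lo - 1 + 1 = lo by omega, triSum_self]; omega
        · rw [pvLoopA, if_neg hfit]; omega

-- A's sorted unique list is exactly the increasing range filtered by membership
lemma sorted_diff_eq_filter (M : Int) (cs : List Int) :
    PySem.List.sorted
      (PySem.Set.diff (PySem.Set.ofList (PySem.List.pyRange 1 (M + 1) 1)) (PySem.Set.ofList cs))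
      (fun x => x) false
    = (PySem.List.pyRange 1 (M + 1) 1).filter
        (fun x => !(PySem.Set.contains (PySem.Set.ofList cs) x)) := by
  apply PySem.List.sorted_eq_of_perm_of_pairwise_lt
  · rw [List.perm_ext_iff_of_nodup
      (List.Nodup.filter _ (PySem.List.nodup_pyRange_one 1 (M + 1)))
      (PySem.Set.nodup_diff _ _ (PySem.Set.nodup_ofList _))]
    intro x
    simp [PySem.Set.mem_diff, PySem.Set.mem_ofList]
  · exact List.Pairwise.filter _ (PySem.List.pairwise_lt_pyRange_one 1 (M + 1))

-- main correspondence: A's greedy over the filtered range = B's run loop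
lemma run_eq (M : Int) (skip : PySem.Set Int) :
    ∀ (ex : List Int) (lo tot cnt : Int),
      ex.Pairwise (· < ·) →
      (∀ e ∈ ex, lo ≤ e ∧ e ≤ M) →
      (∀ x, lo ≤ x → x ≤ M → (PySem.Set.contains skip x = true ↔ x ∈ ex)) →
      1 ≤ lo → tot ≤ M →
      pvLoopA M ((PySem.List.pyRange lo (M + 1) 1).filter
          (fun x => !(PySem.Set.contains skip x))) tot cnt
        = pvRunLoop M (ex ++ [M + 1]) lo tot cnt := by
  intro ex
  induction ex with
  | nil =>
    intro lo tot cnt _ _ hmem hlo htot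
    have hfilter : (PySem.List.pyRange lo (M + 1) 1).filter
        (fun x => !(PySem.Set.contains skip x)) = PySem.List.pyRange lo (M + 1) 1 := by
      apply List.filter_eq_self.mpr
      intro x hx
      have hx' := (PySem.List.mem_pyRange_one).mp hx
      simp only [Bool.not_eq_eq_eq_not, Bool.not_true]
      by_contra hc
      have : x ∈ ([] : List Int) := (hmem x (by omega) (by omega)).mp
        (by revert hc; cases PySem.Set.contains skip x <;> simp)
      simp at this
    rw [hfilter]
    show _ = pvRunLoop M [M + 1] lo tot cnt
    rw [pvRunLoop]
    simp only [add_sub_cancel_right]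
    have happ : PySem.List.pyRange lo (M + 1) 1
        = PySem.List.pyRange lo (M + 1) 1 ++ [] := by simp
    by_cases hlohi : lo ≤ M
    · rw [if_pos hlohi]
      have hrun := loopA_run M M [] ((M + 1 - lo).toNat) lo tot cnt rfl hlo (by omega) htot
      by_cases hall : tot + triSum lo M ≤ M
      · have hall' : tot + PySem.Int.floordiv ((lo + M) * (M - lo + 1)) 2 ≤ M := hall
        rw [if_pos hall']
        rw [happ, hrun.1 hall]
        show pvLoopA M [] _ _ = pvRunLoop M [] _ _ _
        simp only [pvLoopA, pvRunLoop]
        omega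
      · have hall' : ¬ tot + PySem.Int.floordiv ((lo + M) * (M - lo + 1)) 2 ≤ M := hall
        rw [if_neg hall']
        obtain ⟨t, h1, h2, h3, h4, h5⟩ := hrun.2 hall
        rw [happ, h5]
        have hbin := pvBin_char M lo tot M hlo ((M - lo + 1).toNat) lo M rfl le_rfl (by omega) le_rfl
          (by rw [triSum_base]; omega) (by intro x hx1 hx2; omega)
        have heq : t = pvBin M lo tot lo M (lo - 1) :=
          cut_unique M lo M tot t _ hlo (by omega) (by omega) hbin.1 hbin.2.1 h3
            (Or.inr h4) hbin.2.2.1 hbin.2.2.2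
        omega
    · rw [if_neg hlohi]
      rw [PySem.List.pyRange_one_eq_nil (by omega)]
      rfl
  | cons e rest ih =>
    intro lo tot cnt hsort hrange hmem hlo htot
    have hrest_sort : rest.Pairwise (· < ·) := (List.pairwise_cons.mp hsort).2
    have hrest_gt : ∀ y ∈ rest, e < y := (List.pairwise_cons.mp hsort).1
    have he : lo ≤ e ∧ e ≤ M := hrange e (by simp)
    -- split the range at e; everything in [lo, e-1] passes the filter, e does not
    rw [PySem.List.pyRange_one_append lo e (M + 1) (by omega) (by omega), List.filter_append]
    rw [PySem.List.pyRange_one_cons (by omega : e < M + 1), List.filter_cons]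
    have hce : PySem.Set.contains skip e = true := (hmem e he.1 he.2).mpr (by simp)
    rw [hce]
    simp only [Bool.not_true, Bool.false_eq_true, if_false]
    have hfilter1 : (PySem.List.pyRange lo e 1).filter
        (fun x => !(PySem.Set.contains skip x)) = PySem.List.pyRange lo e 1 := by
      apply List.filter_eq_self.mpr
      intro x hx
      have hx' := (PySem.List.mem_pyRange_one).mp hx
      simp only [Bool.not_eq_eq_eq_not, Bool.not_true]
      by_contra hc
      have hxin : x ∈ e :: rest := (hmem x (by omega) (by omega)).mp
        (by revert hc; cases PySem.Set.contains skip x <;> simp)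
      rcases List.mem_cons.mp hxin with h | h
      · omega
      · have := hrest_gt x h; omega
    rw [hfilter1]
    -- hypotheses for the recursive tail
    have hmem' : ∀ x, e + 1 ≤ x → x ≤ M → (PySem.Set.contains skip x = true ↔ x ∈ rest) := by
      intro x hx1 hx2
      rw [hmem x (by omega) hx2]
      constructor
      · intro h
        rcases List.mem_cons.mp h with h' | h'
        · omega
        · exact h'
      · intro h
        exact List.mem_cons_of_mem _ h
    have hrange' : ∀ y ∈ rest, e + 1 ≤ y ∧ y ≤ M := by
      intro y hy
      exact ⟨by have := hrest_gt y hy; omega, (hrange y (by simp [hy])).2⟩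
    show _ = pvRunLoop M ((e :: rest) ++ [M + 1]) lo tot cnt
    rw [List.cons_append, pvRunLoop]
    by_cases hlohi : lo ≤ e - 1
    · rw [if_pos hlohi]
      have hrun := loopA_run M (e - 1)
        ((PySem.List.pyRange (e + 1) (M + 1) 1).filter (fun x => !(PySem.Set.contains skip x)))
        ((e - lo).toNat) lo tot cnt (by omega) hlo (by omega) htot
      rw [show PySem.List.pyRange lo e 1 = PySem.List.pyRange lo (e - 1 + 1) 1 by
        congr 1; omega]
      by_cases hall : tot + triSum lo (e - 1) ≤ M
      · have hall' : tot + PySem.Int.floordiv ((lo + (e - 1)) * (e - 1 - lo + 1)) 2 ≤ M := hall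
        rw [if_pos hall']
        rw [hrun.1 hall]
        rw [show cnt + (e - 1 + 1 - lo) = cnt + (e - 1 - lo + 1) by omega]
        exact ih (e + 1) (tot + triSum lo (e - 1)) (cnt + (e - 1 - lo + 1))
          hrest_sort hrange' hmem' (by omega) hall
      · have hall' : ¬ tot + PySem.Int.floordiv ((lo + (e - 1)) * (e - 1 - lo + 1)) 2 ≤ M := hall
        rw [if_neg hall']
        obtain ⟨t, h1, h2, h3, h4, h5⟩ := hrun.2 hall
        rw [h5]
        have hbin := pvBin_char M lo tot (e - 1) hlo ((e - 1 - lo + 1).toNat) lo (e - 1) rfl le_rfl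
          (by omega) le_rfl (by rw [triSum_base]; omega) (by intro x hx1 hx2; omega)
        have heq : t = pvBin M lo tot lo (e - 1) (lo - 1) :=
          cut_unique M lo (e - 1) tot t _ hlo (by omega) (by omega) hbin.1 hbin.2.1 h3
            (Or.inr h4) hbin.2.2.1 hbin.2.2.2
        omega
    · rw [if_neg hlohi]
      rw [PySem.List.pyRange_one_eq_nil (by omega), List.nil_append]
      exact ih (e + 1) tot cnt hrest_sort hrange' hmem' (by omega) htot

-- ===== VERDICT (by name: the statement is the Claim_ definition above) =====
theorem get_unique_stones_to_bring_spec : Claim_equal_get_unique_stones_to_bring := by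
  intro M N cs _
  unfold Spec_get_unique_stones_to_bring
  unfold get_unique_stones_to_bring get_unique_stones_to_bring_alt
  simp only
  rw [sorted_diff_eq_filter]
  by_cases hM : 0 ≤ M
  · apply run_eq M (PySem.Set.ofList cs)
    · exact PySem.List.sorted_ofList_pairwise_lt _
    · intro e he
      rw [PySem.List.mem_sorted, PySem.Set.mem_ofList, List.mem_filter] at he
      have := he.2
      simp at this
      omega
    · intro x hx1 hx2
      rw [PySem.List.mem_sorted, PySem.Set.mem_ofList, List.mem_filter]
      constructor
      · intro h
        refine ⟨?_, by simp; omega⟩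
        have := (PySem.Set.mem_ofList cs x).mp ?_
        · exact this
        · revert h; cases hc : PySem.Set.contains (PySem.Set.ofList cs) x
          · simp
          · intro _
            exact (PySem.Set.contains_iff _ _).mp hc
      · intro h
        exact (PySem.Set.contains_iff _ _).mpr ((PySem.Set.mem_ofList cs x).mpr h.1)
    · omega
    · exact hM
  · -- M < 0: both sides are trivially 0
    rw [PySem.List.pyRange_one_eq_nil (by omega)]
    have hfe : cs.filter (fun c => decide (1 ≤ c) && decide (c ≤ M)) = [] := by
      apply List.filter_eq_nil_iff.mpr
      intro c _
      simp; omega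
    rw [hfe]
    show pvLoopA M [] 0 0 = pvRunLoop M ([M + 1]) 1 0 0
    rw [pvRunLoop, if_neg (by omega)]
    rfl
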